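-- pv_equiv track=rewrite | github.com/GuneevS/DocuMantis | app/services/pdf_service.py | group_fields_by_semantics
-- ===== SOURCE A (Python) =====
-- from typing import Dict, List, Optional, Tuple, Set
--
-- def group_fields_by_semantics(form_fields: Dict) -> Dict[str, List[str]]:
--     """
--     Group fields that are semantically identical based on their fingerprints.
--
--     Args:
--         form_fields: Dictionary of form fields with their properties
--
--     Returns:
--         Dictionary mapping semantic groups to lists of field names
--     """
--     semantic_groups = {}
--
--     # Group by fingerprint type (ignoring confidence scores)
--     for field_name, field_info in form_fields.items():
--         fingerprint = field_info.get('semantic_fingerprint', '')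
--         if not fingerprint:
--             continue
--
--         # Extract just the type portion of the fingerprint
--         semantic_type = fingerprint.split(':')[0]
--
--         if semantic_type not in semantic_groups:
--             semantic_groups[semantic_type] = []
--
--         semantic_groups[semantic_type].append(field_name)
--
--     # Only return groups with multiple fields
--     return {k: v for k, v in semantic_groups.items() if len(v) > 1}
-- ===== SOURCE B (Python) =====
-- def group_fields_by_semantics(form_fields):
--     """Two-pass version: count fields per semantic type first, then collect
--     names for types that occur more than once in a filtered second scan."""
--     counts = {}
--     for field_info in form_fields.values():
--         fingerprint = field_info.get('semantic_fingerprint', '')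
--         if fingerprint:
--             semantic_type = fingerprint.split(':')[0]
--             counts[semantic_type] = counts.get(semantic_type, 0) + 1
--
--     result = {}
--     for field_name, field_info in form_fields.items():
--         fingerprint = field_info.get('semantic_fingerprint', '')
--         if fingerprint:
--             semantic_type = fingerprint.split(':')[0]
--             if counts[semantic_type] > 1:
--                 result.setdefault(semantic_type, []).append(field_name)
--     return result
-- ===== Notes on version B (the rewrite author's own statement) =====
-- stated objective: alternative
-- what changed: Replaces A's group-everything-into-lists-then-filter pass with a counting first pass over the fields and a filtered second scan that appends a field name only when its semantic type's count exceeds one.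
import Mathlib
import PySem

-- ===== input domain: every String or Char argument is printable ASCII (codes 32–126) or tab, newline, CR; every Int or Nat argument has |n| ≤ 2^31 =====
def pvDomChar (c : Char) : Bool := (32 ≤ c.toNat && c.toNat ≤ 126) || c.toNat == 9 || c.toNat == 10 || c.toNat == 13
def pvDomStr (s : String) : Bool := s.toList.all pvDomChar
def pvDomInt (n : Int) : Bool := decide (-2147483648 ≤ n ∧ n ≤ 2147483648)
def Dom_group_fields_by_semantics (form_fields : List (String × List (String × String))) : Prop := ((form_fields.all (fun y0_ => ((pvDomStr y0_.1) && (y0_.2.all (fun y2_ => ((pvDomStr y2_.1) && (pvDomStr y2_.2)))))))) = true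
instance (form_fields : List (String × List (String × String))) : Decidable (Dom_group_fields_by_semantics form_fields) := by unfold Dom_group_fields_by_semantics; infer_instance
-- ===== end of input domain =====

-- B replaces A's group-everything-then-filter with a counting first pass and a
-- filtered second scan that only collects names whose type occurs more than once
-- (objective: alternative decomposition, same cost).

-- shared helpers (subexpressions both Pythons evaluate identically)
-- field_info.get('semantic_fingerprint', '')
def pvGetFp (info : List (String × String)) : String :=
  (PySem.Dict.ofList info).getD "semantic_fingerprint" ""

-- fingerprint.split(':')[0]
def pvSemType (fp : String) : String :=
  PySem.List.pyGetD ((PySem.Chars.splitOn fp.toList ":".toList).map String.ofList) 0 ""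

-- ===== PORT A =====
def group_fields_by_semantics (form_fields : List (String × List (String × String))) : List (String × List String) :=
  let semantic_groups : PySem.Dict String (List String) :=
    form_fields.foldl (fun groups field =>
      let fingerprint := pvGetFp field.2
      if fingerprint = "" then groups
      else
        let semantic_type := pvSemType fingerprint
        let groups := if groups.contains semantic_type then groups
                      else groups.insert semantic_type []
        groups.modify semantic_type [] (fun v => v ++ [field.1])) PySem.Dict.empty
  semantic_groups.items.filter (fun p => decide (1 < p.2.length))

-- ===== PORT B =====
def group_fields_by_semantics_alt (form_fields : List (String × List (String × String))) : List (String × List String) :=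
  let counts : PySem.Dict String Int :=
    form_fields.foldl (fun d field =>
      let fingerprint := pvGetFp field.2
      if fingerprint = "" then d
      else
        let semantic_type := pvSemType fingerprint
        d.insert semantic_type (d.getD semantic_type 0 + 1)) PySem.Dict.empty
  let result : PySem.Dict String (List String) :=
    form_fields.foldl (fun r field =>
      let fingerprint := pvGetFp field.2
      if fingerprint = "" then r
      else
        let semantic_type := pvSemType fingerprint
        if 1 < counts.getD semantic_type 0 then
          r.modify semantic_type [] (fun v => v ++ [field.1])
        else r) PySem.Dict.empty
  result.items

-- ===== PRECONDITION & SPEC =====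
def Spec_group_fields_by_semantics (form_fields : List (String × List (String × String))) (out : List (String × List String)) : Prop := out = group_fields_by_semantics_alt form_fields
instance (form_fields : List (String × List (String × String))) (out : List (String × List String)) : Decidable (Spec_group_fields_by_semantics form_fields out) := by unfold Spec_group_fields_by_semantics; infer_instance

-- ===== CLAIM (what is proved, stated in full; the proofs are below) =====
def Claim_equal_group_fields_by_semantics : Prop := ∀ (form_fields : List (String × List (String × String))), Dom_group_fields_by_semantics form_fields → Spec_group_fields_by_semantics form_fields (group_fields_by_semantics form_fields)

-- ===== LEMMAS AND PROOFS =====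

-- the relevant (semantic_type, field_name) events, in order, skipping empty fingerprints
def pvEvs (form_fields : List (String × List (String × String))) : List (String × String) :=
  form_fields.filterMap (fun field =>
    let fp := pvGetFp field.2
    if fp = "" then none else some (pvSemType fp, field.1))

-- both programs' loops skip empty fingerprints: a fold over form_fields is a fold over pvEvs
theorem pv_foldl_evs {D : Type} (g : D → String × String → D) (init : D)
    (ff : List (String × List (String × String))) :
    ff.foldl (fun d field =>
      if pvGetFp field.2 = "" then d else g d (pvSemType (pvGetFp field.2), field.1)) init
      = (pvEvs ff).foldl g init := by
  induction ff generalizing init with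
  | nil => rfl
  | cons f t ih =>
      simp only [pvEvs, List.filterMap_cons, List.foldl_cons]
      by_cases h : pvGetFp f.2 = "" <;> simp [h, ih, pvEvs]

-- A's setdefault-then-append step is a plain modify
theorem pv_stepA_eq (d : PySem.Dict String (List String)) (t n : String) :
    (if d.contains t then d else d.insert t []).modify t [] (fun v => v ++ [n])
      = d.modify t [] (fun v => v ++ [n]) := by
  by_cases h : d.contains t
  · simp [h]
  · simp only [h, Bool.not_eq_true, if_neg]
    rw [PySem.Dict.modify, PySem.Dict.modify, PySem.Dict.insert_insert_self,
      PySem.Dict.getD_insert_self, PySem.Dict.getD_of_not_contains d [] (by simp [h])]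

-- adding a kept element commutes with filter
theorem pv_add_filter (p : String → Bool) (s : List String) (x : String) (hp : p x = true) :
    (PySem.Set.add s x).filter p = PySem.Set.add (s.filter p) x := by
  by_cases hc : x ∈ s
  · have hm : x ∈ s.filter p := List.mem_filter.mpr ⟨hc, hp⟩
    simp [PySem.Set.add, PySem.Set.contains, hc, hm]
  · have hm : x ∉ s.filter p := fun h => hc (List.mem_filter.mp h).1
    simp [PySem.Set.add, PySem.Set.contains, hc, hm, List.filter_append, hp]

-- dropping a filtered-out element leaves the accumulated set's filtration unchanged
theorem pv_add_filter_neg (p : String → Bool) (s : List String) (x : String) (hp : p x = false) :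
    (PySem.Set.add s x).filter p = s.filter p := by
  by_cases hc : x ∈ s
  · simp [PySem.Set.add, PySem.Set.contains, hc]
  · simp [PySem.Set.add, PySem.Set.contains, hc, List.filter_append, hp]

theorem pv_foldl_add_filter (p : String → Bool) (l s : List String) :
    ((l.foldl PySem.Set.add s).filter p) = (l.filter p).foldl PySem.Set.add (s.filter p) := by
  induction l generalizing s with
  | nil => rfl
  | cons x t ih =>
      simp only [List.foldl_cons, List.filter_cons]
      by_cases hp : p x
      · rw [hp, if_pos rfl, List.foldl_cons, ih, pv_add_filter p s x hp]
      · rw [Bool.not_eq_true] at hp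
        rw [hp, if_neg (by simp), ih, pv_add_filter_neg p s x hp]

-- Set.ofList commutes with filter
theorem pv_ofList_filter (p : String → Bool) (l : List String) :
    PySem.Set.ofList (l.filter p) = (PySem.Set.ofList l).filter p := by
  rw [PySem.Set.ofList, PySem.Set.ofList, pv_foldl_add_filter]
  rfl

-- ===== VERDICT (by name: the statement is the Claim_ definition above) =====
theorem group_fields_by_semantics_spec : Claim_equal_group_fields_by_semantics := by
  intro ff _
  unfold Spec_group_fields_by_semantics group_fields_by_semantics group_fields_by_semantics_alt
  -- abbreviations
  set E := pvEvs ff with hE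
  -- A's grouping dict
  have hAfold :
      ff.foldl (fun groups field =>
        let fingerprint := pvGetFp field.2
        if fingerprint = "" then groups
        else
          let semantic_type := pvSemType fingerprint
          let groups := if groups.contains semantic_type then groups
                        else groups.insert semantic_type []
          groups.modify semantic_type [] (fun v => v ++ [field.1])) PySem.Dict.empty
      = E.foldl (fun d p => d.modify p.1 [] (fun v => v ++ [p.2])) PySem.Dict.empty := by
    refine Eq.trans (PySem.List.foldl_congr_mem ff _
      (fun d field => if pvGetFp field.2 = "" then d
        else (fun (d : PySem.Dict String (List String)) (p : String × String) =>
          d.modify p.1 [] (fun v => v ++ [p.2])) d (pvSemType (pvGetFp field.2), field.1))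
      PySem.Dict.empty ?_) (pv_foldl_evs (fun d p => d.modify p.1 [] (fun v => v ++ [p.2])) PySem.Dict.empty ff)
    intro acc x _
    by_cases h : pvGetFp x.2 = "" <;> simp [h, pv_stepA_eq]
  set g := E.foldl (fun d p => d.modify p.1 [] (fun v => v ++ [p.2])) PySem.Dict.empty with hg
  have hkeys : g.keys = PySem.Set.ofList (E.map (fun p => p.1)) := by
    rw [hg, PySem.Dict.keys_foldl_modify_key E (fun p => p.1) []
      (fun _ p => fun v => v ++ [p.2]) PySem.Dict.empty, PySem.Dict.keys_empty]
    rfl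
  have hnd : g.keys.Nodup := by
    rw [hg]
    exact PySem.Dict.nodup_keys_foldl_modify_key E (fun p => p.1) [] _ PySem.Dict.empty
      (by rw [PySem.Dict.keys_empty]; exact List.nodup_nil)
  have hget : ∀ t, g.getD t [] = (E.filter (fun p => p.1 == t)).map (fun p => p.2) := by
    intro t
    rw [hg, PySem.Dict.getD_foldl_modify_append E PySem.Dict.empty t, PySem.Dict.getD_empty]
    rfl
  have hitemsA : g.items = (PySem.Set.ofList (E.map (fun p => p.1))).map (fun t => (t, g.getD t [])) := by
    rw [PySem.Dict.items_eq_map_keys g hnd [], hkeys]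
  -- B's count dict
  have hcfold : ff.foldl (fun d field =>
        if pvGetFp field.2 = "" then d
        else d.insert (pvSemType (pvGetFp field.2)) (d.getD (pvSemType (pvGetFp field.2)) 0 + 1))
        (PySem.Dict.empty : PySem.Dict String Int)
      = E.foldl (fun d p => d.insert p.1 (d.getD p.1 0 + 1)) PySem.Dict.empty :=
    pv_foldl_evs (fun (d : PySem.Dict String Int) p => d.insert p.1 (d.getD p.1 0 + 1))
      PySem.Dict.empty ff
  set cd : PySem.Dict String Int := E.foldl (fun d p => d.insert p.1 (d.getD p.1 0 + 1)) PySem.Dict.empty with hcd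
  have hcdmap : cd = (E.map (fun p => p.1)).foldl (fun d x => d.insert x (d.getD x 0 + 1)) PySem.Dict.empty := by
    rw [hcd]
    exact (List.foldl_map (f := fun p : String × String => p.1)
      (g := fun (d : PySem.Dict String Int) x => d.insert x (d.getD x 0 + 1))).symm
  have hcnt : ∀ t : String, cd.getD t 0 = (((E.map (fun p => p.1)).count t : Nat) : Int) := by
    intro t
    rw [hcdmap, PySem.Dict.getD_foldl_insert_add_one, PySem.Dict.getD_empty, zero_add]
  set condT : String → Bool := fun t => decide (1 < (E.map (fun p => p.1)).count t) with hcondT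
  -- B's second fold
  have hrfold : ff.foldl (fun r field =>
        if pvGetFp field.2 = "" then r
        else if 1 < cd.getD (pvSemType (pvGetFp field.2)) 0 then
          r.modify (pvSemType (pvGetFp field.2)) [] (fun v => v ++ [field.1])
        else r) PySem.Dict.empty
      = E.foldl (fun r p => if 1 < cd.getD p.1 0 then r.modify p.1 [] (fun v => v ++ [p.2]) else r)
          PySem.Dict.empty :=
    pv_foldl_evs (fun r p => if 1 < cd.getD p.1 0 then r.modify p.1 [] (fun v => v ++ [p.2]) else r)
      PySem.Dict.empty ff
  have hEfilter : E.foldl (fun r p => if 1 < cd.getD p.1 0 then r.modify p.1 [] (fun v => v ++ [p.2]) else r)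
        PySem.Dict.empty
      = (E.filter (fun p => condT p.1)).foldl (fun r p => r.modify p.1 [] (fun v => v ++ [p.2]))
          PySem.Dict.empty := by
    refine (PySem.List.foldl_ite_eq_foldl_filter (fun p : String × String => 1 < cd.getD p.1 0)
      (fun r p => r.modify p.1 [] (fun v => v ++ [p.2])) E PySem.Dict.empty).trans ?_
    rw [List.filter_congr (q := fun p : String × String => condT p.1)
      (fun p _ => by rw [hcnt p.1]; simp only [hcondT]; simp)]
  set E' := E.filter (fun p => condT p.1) with hE'
  set r := E'.foldl (fun r p => r.modify p.1 [] (fun v => v ++ [p.2])) PySem.Dict.empty with hr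
  have hndr : r.keys.Nodup := by
    rw [hr]
    exact PySem.Dict.nodup_keys_foldl_modify_key E' (fun p => p.1) [] _ PySem.Dict.empty
      (by rw [PySem.Dict.keys_empty]; exact List.nodup_nil)
  have hkeysr : r.keys = PySem.Set.ofList (E'.map (fun p => p.1)) := by
    rw [hr, PySem.Dict.keys_foldl_modify_key E' (fun p => p.1) []
      (fun _ p => fun v => v ++ [p.2]) PySem.Dict.empty, PySem.Dict.keys_empty]
    rfl
  have hgetr : ∀ t, r.getD t [] = (E'.filter (fun p => p.1 == t)).map (fun p => p.2) := by
    intro t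
    rw [hr, PySem.Dict.getD_foldl_modify_append E' PySem.Dict.empty t, PySem.Dict.getD_empty]
    rfl
  have hitemsB : r.items = (PySem.Set.ofList (E'.map (fun p => p.1))).map (fun t => (t, r.getD t [])) := by
    rw [PySem.Dict.items_eq_map_keys r hndr [], hkeysr]
  have hmapfst : E'.map (fun p => p.1) = (E.map (fun p => p.1)).filter condT := by
    rw [hE']
    exact (List.filter_map (f := fun p : String × String => p.1) (p := condT)).symm
  -- lengths of A's groups are B's counts
  have hlen : ∀ t, (g.getD t []).length = (E.map (fun p => p.1)).count t := by
    intro t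
    rw [hget t, List.length_map, List.count_eq_countP, List.countP_map,
      List.countP_eq_length_filter]
    rfl
  -- finish
  rw [hAfold, hcfold]
  dsimp only
  rw [hrfold, hEfilter, hitemsA, hitemsB, hmapfst,
    pv_ofList_filter condT (E.map (fun p => p.1)), List.filter_map]
  have hpred : ((fun p : String × List String => decide (1 < p.2.length)) ∘ (fun t => (t, g.getD t [])))
      = condT := by
    funext t
    simp only [Function.comp, hlen t, hcondT]
  rw [hpred]
  refine List.map_congr_left ?_
  intro t ht
  have hct : condT t = true := (List.mem_filter.mp ht).2
  have : E'.filter (fun p => p.1 == t) = E.filter (fun p => p.1 == t) := by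
    rw [hE', List.filter_filter]
    refine List.filter_congr ?_
    intro a _
    by_cases hat : a.1 = t
    · simp [hat, hct]
    · simp [hat]
  rw [hget t, hgetr t, this]
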